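-- pv_equiv track=rewrite | github.com/MaxwellVale/CS01 | lab2/lab2b.py | count_letter_matches
-- ===== SOURCE A (Python) =====
-- def count_letter_matches(str1, str2):
--     '''
--     Function count_letter_matches
--     Counts the number of letter matches without necessarily matching in position
--
--     Arguments
--     str1, str2 --> Strings with length 4 composed of r, g, b, y, o, and w
--
--     Return
--     Returns an integer representing the number of letter matches between str1 and str2
--     '''
--     strList = list(str2)
--     matches = 0
--     for index in range(4):
--         if str1[index] in strList:
--             strList.remove(str1[index])
--             matches += 1
--     return matches
-- ===== SOURCE B (Python) =====
-- def count_letter_matches(str1, str2):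
--     # Frequency-table version: count the four letters of str1 and the letters
--     # of str2, then sum per-letter minimum counts (multiset intersection size).
--     counts1 = {}
--     for i in range(4):
--         ch = str1[i]
--         counts1[ch] = counts1.get(ch, 0) + 1
--     counts2 = {}
--     for ch in str2:
--         counts2[ch] = counts2.get(ch, 0) + 1
--     return sum(min(n, counts2.get(ch, 0)) for ch, n in counts1.items())
-- ===== Notes on version B (the rewrite author's own statement) =====
-- stated objective: idiomatic
-- what changed: Replaces the per-position membership test with in-place list.remove by two frequency tables (dicts) and a sum of per-letter minimum counts.
import Mathlib
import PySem

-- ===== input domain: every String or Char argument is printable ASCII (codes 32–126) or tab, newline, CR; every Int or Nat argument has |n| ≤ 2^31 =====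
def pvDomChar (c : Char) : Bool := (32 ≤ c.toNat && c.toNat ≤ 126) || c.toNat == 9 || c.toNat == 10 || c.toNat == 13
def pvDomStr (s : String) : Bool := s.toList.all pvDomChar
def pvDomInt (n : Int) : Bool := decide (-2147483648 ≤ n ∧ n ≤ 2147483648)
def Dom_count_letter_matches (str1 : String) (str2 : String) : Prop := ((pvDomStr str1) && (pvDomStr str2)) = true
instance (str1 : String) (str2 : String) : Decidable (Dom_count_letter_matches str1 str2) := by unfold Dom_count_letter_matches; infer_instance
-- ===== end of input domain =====

-- B replaces A's per-position membership test + in-place list.remove by two frequency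
-- tables and a sum of per-letter minimum counts (idiomatic; same asymptotic cost here).

-- ===== PORT A =====
-- for index in range(4): if str1[index] in strList: strList.remove(str1[index]); matches += 1
-- strList.remove(x) is executed only when x ∈ strList, where it is List.erase
-- (PySem.List.remove?_eq_some_erase); the 'none' arm of pyGet? is Python's IndexError,
-- excluded by Pre_ (state returned unchanged there, never reached inside Pre_).
def count_letter_matches (str1 : String) (str2 : String) : Int :=
  let strList := str2.toList
  let res := (PySem.List.pyRange 0 4 1).foldl
    (fun (st : List Char × Int) index =>
      match PySem.Str.pyGet? str1 index with
      | none => st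
      | some ch => if ch ∈ st.1 then (st.1.erase ch, st.2 + 1) else st)
    (strList, 0)
  res.2

-- ===== PORT B =====
-- for i in range(4): ch = str1[i]; counts1[ch] = counts1.get(ch, 0) + 1 — dicts are PySem.Dict;
-- the 'none' arm of pyGet? is Python's IndexError, excluded by Pre_ (dict unchanged there).
def count_letter_matches_alt (str1 : String) (str2 : String) : Int :=
  let counts1 := (PySem.List.pyRange 0 4 1).foldl
    (fun (d : PySem.Dict Char Int) i =>
      match PySem.Str.pyGet? str1 i with
      | none => d
      | some ch => d.insert ch (d.getD ch 0 + 1)) PySem.Dict.empty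
  let counts2 := str2.toList.foldl
    (fun (d : PySem.Dict Char Int) ch => d.insert ch (d.getD ch 0 + 1)) PySem.Dict.empty
  (counts1.items.map (fun p => min p.2 (counts2.getD p.1 0))).sum

-- ===== PRECONDITION & SPEC =====
-- A indexes str1[0..3], so Python raises IndexError whenever len(str1) < 4.
def Pre_count_letter_matches (str1 : String) (str2 : String) : Prop :=
  4 ≤ str1.toList.length
instance (str1 : String) (str2 : String) : Decidable (Pre_count_letter_matches str1 str2) := by unfold Pre_count_letter_matches; infer_instance
def pvWitness_count_letter_matches : String × String := ("rgby", "ygbr")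

def Spec_count_letter_matches (str1 : String) (str2 : String) (out : Int) : Prop := out = count_letter_matches_alt str1 str2
instance (str1 : String) (str2 : String) (out : Int) : Decidable (Spec_count_letter_matches str1 str2 out) := by unfold Spec_count_letter_matches; infer_instance

-- ===== CLAIM (what is proved, stated in full; the proofs are below) =====
def Claim_equal_count_letter_matches : Prop := ∀ (str1 : String) (str2 : String), Dom_count_letter_matches str1 str2 → Pre_count_letter_matches str1 str2 → Spec_count_letter_matches str1 str2 (count_letter_matches str1 str2)

-- ===== LEMMAS AND PROOFS =====

-- A's loop over a list of characters computes the cardinality of the multiset intersection.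
lemma loopA_eq_card_inter (cs l2 : List Char) (acc : Int) :
    (cs.foldl
      (fun (st : List Char × Int) ch =>
        if ch ∈ st.1 then (st.1.erase ch, st.2 + 1) else st)
      (l2, acc)).2
    = acc + ((Multiset.card ((cs : Multiset Char) ∩ (l2 : Multiset Char))) : Int) := by
  induction cs generalizing l2 acc with
  | nil => simp
  | cons c cs ih =>
    by_cases h : c ∈ l2
    · rw [List.foldl_cons, if_pos h, ih]
      have : ((c :: cs : List Char) : Multiset Char) ∩ (l2 : Multiset Char)
          = c ::ₘ ((cs : Multiset Char) ∩ ((l2 : Multiset Char).erase c)) := by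
        simpa using Multiset.cons_inter_of_pos (cs : Multiset Char) (Multiset.mem_coe.mpr h)
      rw [show ((l2.erase c : List Char) : Multiset Char) = (l2 : Multiset Char).erase c from
        (Multiset.coe_erase l2 c)]
      simp [this]
      ring
    · rw [List.foldl_cons, if_neg h, ih]
      have : ((c :: cs : List Char) : Multiset Char) ∩ (l2 : Multiset Char)
          = (cs : Multiset Char) ∩ (l2 : Multiset Char) := by
        simpa using Multiset.cons_inter_of_neg (cs : Multiset Char) (fun hc => h (Multiset.mem_coe.mp hc))
      simp [this]

-- B's per-letter minimum sum computes the same cardinality (Nat level).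
lemma sum_min_counts_eq_card_inter (cs l2 : List Char) :
    ((PySem.Set.ofList cs).map (fun k => min (cs.count k) (l2.count k))).sum
    = Multiset.card ((cs : Multiset Char) ∩ (l2 : Multiset Char)) := by
  have hnd : (PySem.Set.ofList cs).Nodup := PySem.Set.nodup_ofList cs
  rw [← List.sum_toFinset _ hnd]
  have hfs : (PySem.Set.ofList cs).toFinset = cs.toFinset := by
    ext a; simp [PySem.Set.mem_ofList]
  rw [hfs]
  rw [← Multiset.toFinset_sum_count_eq ((cs : Multiset Char) ∩ (l2 : Multiset Char))]
  symm
  have hsub : ((cs : Multiset Char) ∩ (l2 : Multiset Char)).toFinset ⊆ cs.toFinset := by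
    intro a ha
    simp only [Multiset.mem_toFinset, Multiset.mem_inter] at ha
    simpa [List.mem_toFinset] using ha.1
  calc ∑ a ∈ ((cs : Multiset Char) ∩ (l2 : Multiset Char)).toFinset,
          Multiset.count a ((cs : Multiset Char) ∩ (l2 : Multiset Char))
      = ∑ a ∈ ((cs : Multiset Char) ∩ (l2 : Multiset Char)).toFinset,
          min (cs.count a) (l2.count a) := by
        apply Finset.sum_congr rfl
        intro a _
        simp
    _ = ∑ a ∈ cs.toFinset, min (cs.count a) (l2.count a) := by
        apply Finset.sum_subset hsub
        intro a _ ha2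
        have h0 : Multiset.count a ((cs : Multiset Char) ∩ (l2 : Multiset Char)) = 0 := by
          rw [Multiset.count_eq_zero]
          simpa [Multiset.mem_toFinset] using ha2
        rw [Multiset.count_inter] at h0
        simpa using h0

-- a list of length ≥ 4 starts with four elements
lemma exists_four {α : Type} (ls : List α) (h : 4 ≤ ls.length) :
    ∃ a b c d t, ls = a :: b :: c :: d :: t := by
  rcases ls with _ | ⟨a, _ | ⟨b, _ | ⟨c, _ | ⟨d, t⟩⟩⟩⟩
  · simp at h
  · simp at h
  · simp at h
  · simp at h
  · exact ⟨a, b, c, d, t, rfl⟩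

-- str1[0..3] under the decomposition of str1.toList
lemma str_gets (s : String) (a b c d : Char) (t : List Char)
    (h : s.toList = a :: b :: c :: d :: t) :
    PySem.Str.pyGet? s 0 = some a ∧ PySem.Str.pyGet? s 1 = some b ∧
    PySem.Str.pyGet? s 2 = some c ∧ PySem.Str.pyGet? s 3 = some d := by
  refine ⟨?_, ?_, ?_, ?_⟩ <;>
  · simp only [PySem.Str.pyGet?, h]
    unfold PySem.Chars.pyGet? PySem.List.pyGet? PySem.List.pyIdx?
    split
    · split
      · simp
      · simp_all
        omega
    · omega

-- B's port evaluates to that sum once str1's first four characters are named.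
lemma alt_eq_sum (str1 str2 : String) (a b c d : Char) (t : List Char)
    (hd : str1.toList = a :: b :: c :: d :: t) :
    count_letter_matches_alt str1 str2
    = (((PySem.Set.ofList [a, b, c, d]).map
        (fun k => min (([a, b, c, d] : List Char).count k) (str2.toList.count k))).sum : Int) := by
  obtain ⟨e0, e1, e2, e3⟩ := str_gets str1 a b c d t hd
  unfold count_letter_matches_alt
  rw [show PySem.List.pyRange 0 4 1 = [0, 1, 2, 3] from by decide]
  have hfold : ([a, b, c, d] : List Char).foldl
      (fun (d' : PySem.Dict Char Int) ch => d'.insert ch (d'.getD ch 0 + 1)) PySem.Dict.empty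
      = PySem.Dict.counter [a, b, c, d] :=
    PySem.Dict.foldl_insert_getD_add_one_eq_counter [a, b, c, d]
  simp only [List.foldl_cons, List.foldl_nil] at hfold
  simp only [List.foldl_cons, List.foldl_nil, e0, e1, e2, e3]
  rw [hfold, PySem.Dict.foldl_insert_getD_add_one_eq_counter, PySem.Dict.items_counter,
    List.map_map]
  rw [List.map_congr_left (g := fun k =>
      ((min (([a, b, c, d] : List Char).count k) (str2.toList.count k) : Nat) : Int))
    (fun k _ => by simp [PySem.Dict.getD_counter, Nat.cast_min])]
  rw [Nat.cast_list_sum, List.map_map]; rfl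

-- ===== VERDICT (by name: the statement is the Claim_ definition above) =====
theorem count_letter_matches_spec : Claim_equal_count_letter_matches := by
  intro str1 str2 _ hpre
  unfold Spec_count_letter_matches
  obtain ⟨a, b, c, d, t, hd⟩ := exists_four str1.toList hpre
  obtain ⟨e0, e1, e2, e3⟩ := str_gets str1 a b c d t hd
  unfold count_letter_matches
  rw [show PySem.List.pyRange 0 4 1 = [0, 1, 2, 3] from by decide]
  simp only [List.foldl_cons, List.foldl_nil, e0, e1, e2, e3]
  have hloop := loopA_eq_card_inter [a, b, c, d] str2.toList 0
  simp only [List.foldl_cons, List.foldl_nil] at hloop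
  rw [hloop, alt_eq_sum str1 str2 a b c d t hd, sum_min_counts_eq_card_inter]
  ring
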